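-- pv_equiv track=rewrite | github.com/jncraton/language-identification | identify.py | identify
-- ===== SOURCE A (Python) =====
-- from collections import Counter
--
-- def identify(text):
--     """
--     Returns a language identification for a given sample
--
--     >>> identify("The cats are hungry")
--     'English'
--
--     >>> identify("Los gatos tienen hambre")
--     'Spanish'
--     """
--
--     # Bag of words approach
--     words = Counter(text.lower().split())
--     en_articles = sum(words[n] for n in ['the', 'a', 'an'])
--     es_articles = sum(words[n] for n in ['los', 'las', 'el', 'la','un','una'])
--
--     if es_articles > en_articles:
--         return 'Spanish'
--     else:
--         return 'English'
-- ===== SOURCE B (Python) =====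
-- def identify(text):
--     """Single pass over the words with two tallies; no full histogram is built."""
--     EN = {'the', 'a', 'an'}
--     ES = {'los', 'las', 'el', 'la', 'un', 'una'}
--     en = es = 0
--     for w in text.lower().split():
--         if w in EN:
--             en += 1
--         elif w in ES:
--             es += 1
--     return 'Spanish' if es > en else 'English'
-- ===== Notes on version B (the rewrite author's own statement) =====
-- stated objective: simpler
-- what changed: Replaces the Counter histogram plus two summation passes over article lists with a single pass over the words that maintains just two tallies via set membership.
import Mathlib
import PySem

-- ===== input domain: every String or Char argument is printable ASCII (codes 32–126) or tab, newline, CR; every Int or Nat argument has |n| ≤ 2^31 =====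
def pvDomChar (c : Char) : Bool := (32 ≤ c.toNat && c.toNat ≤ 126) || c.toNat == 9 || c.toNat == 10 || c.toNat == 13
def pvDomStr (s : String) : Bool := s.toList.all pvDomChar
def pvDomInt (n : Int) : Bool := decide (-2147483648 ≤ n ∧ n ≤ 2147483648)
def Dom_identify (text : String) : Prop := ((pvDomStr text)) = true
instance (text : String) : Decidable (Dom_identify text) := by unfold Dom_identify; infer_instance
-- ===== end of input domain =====

-- B replaces A's Counter histogram + two summation passes with one pass keeping two tallies (simpler).


-- ===== PORT A =====
def identify (text : String) : String :=
  let words : PySem.Dict String Int := PySem.Dict.counter (PySem.Str.split₀ (PySem.Str.lower text))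
  let en_articles : Int := (["the", "a", "an"].map (fun n => words.getD n 0)).sum
  let es_articles : Int := (["los", "las", "el", "la", "un", "una"].map (fun n => words.getD n 0)).sum
  if es_articles > en_articles then "Spanish" else "English"

-- ===== PORT B =====
-- the loop body of B: bump the English tally, else the Spanish tally, else leave the pair alone
def pvStep (p : Int × Int) (w : String) : Int × Int :=
  if PySem.Set.contains (PySem.Set.ofList ["the", "a", "an"]) w then (p.1 + 1, p.2)
  else if PySem.Set.contains (PySem.Set.ofList ["los", "las", "el", "la", "un", "una"]) w then (p.1, p.2 + 1)
  else p

def identify_alt (text : String) : String :=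
  let p := (PySem.Str.split₀ (PySem.Str.lower text)).foldl pvStep (0, 0)
  if p.2 > p.1 then "Spanish" else "English"

-- ===== PRECONDITION & SPEC =====
def Spec_identify (text : String) (out : String) : Prop := out = identify_alt text
instance (text : String) (out : String) : Decidable (Spec_identify text out) := by unfold Spec_identify; infer_instance

-- ===== CLAIM (what is proved, stated in full; the proofs are below) =====
def Claim_equal_identify : Prop := ∀ (text : String), Dom_identify text → Spec_identify text (identify text)

-- ===== LEMMAS AND PROOFS =====

theorem pvStep_miss (p : Int × Int) (w : String)
    (h1 : w ≠ "the") (h2 : w ≠ "a") (h3 : w ≠ "an") (h4 : w ≠ "los") (h5 : w ≠ "las")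
    (h6 : w ≠ "el") (h7 : w ≠ "la") (h8 : w ≠ "un") (h9 : w ≠ "una") :
    pvStep p w = p := by
  simp [pvStep, PySem.Set.contains, PySem.Set.ofList, h1, h2, h3, h4, h5, h6, h7, h8, h9]

-- B's single-pass fold computes (en-count, es-count) as sums of the individual word counts.
theorem identify_fold_eq (ws : List String) (a b : Int) :
    ws.foldl pvStep (a, b)
    = (a + (ws.count "the" + ws.count "a" + ws.count "an" : Int),
       b + (ws.count "los" + ws.count "las" + ws.count "el" + ws.count "la" + ws.count "un" + ws.count "una" : Int)) := by
  induction ws generalizing a b with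
  | nil => simp
  | cons w ws ih =>
    rcases eq_or_ne w "the" with rfl | h1
    · rw [List.foldl_cons, show pvStep (a, b) "the" = (a + 1, b) from rfl, ih]
      simp; ring
    rcases eq_or_ne w "a" with rfl | h2
    · rw [List.foldl_cons, show pvStep (a, b) "a" = (a + 1, b) from rfl, ih]
      simp; ring
    rcases eq_or_ne w "an" with rfl | h3
    · rw [List.foldl_cons, show pvStep (a, b) "an" = (a + 1, b) from rfl, ih]
      simp; ring
    rcases eq_or_ne w "los" with rfl | h4
    · rw [List.foldl_cons, show pvStep (a, b) "los" = (a, b + 1) from rfl, ih]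
      simp; ring
    rcases eq_or_ne w "las" with rfl | h5
    · rw [List.foldl_cons, show pvStep (a, b) "las" = (a, b + 1) from rfl, ih]
      simp; ring
    rcases eq_or_ne w "el" with rfl | h6
    · rw [List.foldl_cons, show pvStep (a, b) "el" = (a, b + 1) from rfl, ih]
      simp; ring
    rcases eq_or_ne w "la" with rfl | h7
    · rw [List.foldl_cons, show pvStep (a, b) "la" = (a, b + 1) from rfl, ih]
      simp; ring
    rcases eq_or_ne w "un" with rfl | h8
    · rw [List.foldl_cons, show pvStep (a, b) "un" = (a, b + 1) from rfl, ih]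
      simp; ring
    rcases eq_or_ne w "una" with rfl | h9
    · rw [List.foldl_cons, show pvStep (a, b) "una" = (a, b + 1) from rfl, ih]
      simp; ring
    rw [List.foldl_cons, pvStep_miss _ _ h1 h2 h3 h4 h5 h6 h7 h8 h9, ih]
    simp [h1, h2, h3, h4, h5, h6, h7, h8, h9]

-- ===== VERDICT (by name: the statement is the Claim_ definition above) =====
theorem identify_spec : Claim_equal_identify := by
  intro text _
  unfold Spec_identify identify identify_alt
  simp only [identify_fold_eq, PySem.Dict.getD_counter, List.map_cons, List.map_nil,
    List.sum_cons, List.sum_nil, add_zero, zero_add, gt_iff_lt]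
  split_ifs with h1 h2 <;> first | rfl | (exfalso; omega)
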